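-- pv_equiv track=rewrite | github.com/Dulatr/PythonLearningByDoing | Text/PigLatin/latin.py | isCluster
-- ===== SOURCE A (Python) =====
-- vowels=['a','e','i','o','u']
--
-- def isConsonant(character):
--     for item in vowels:
--         if character == item:
--             return False
--     return True
--
-- def isCluster(string):
--     n=0
--     for char in string:
--         if not isConsonant(char):
--             break
--         n+=1
--     if n > 1:
--         return (True, n)
--     else:
--         return (False, 0)
-- ===== SOURCE B (Python) =====
-- def isCluster(string):
--     hits = [i for i in (string.find(v) for v in "aeiou") if i != -1]
--     n = min(hits) if hits else len(string)
--     return (True, n) if n > 1 else (False, 0)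
-- ===== Notes on version B (the rewrite author's own statement) =====
-- stated objective: alternative
-- what changed: B computes each vowel's first occurrence index with one str.find per vowel and takes the minimum of the found indices (defaulting to len(string)), instead of A's single left-to-right counting loop that scans the vowel list per character.
import Mathlib
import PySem

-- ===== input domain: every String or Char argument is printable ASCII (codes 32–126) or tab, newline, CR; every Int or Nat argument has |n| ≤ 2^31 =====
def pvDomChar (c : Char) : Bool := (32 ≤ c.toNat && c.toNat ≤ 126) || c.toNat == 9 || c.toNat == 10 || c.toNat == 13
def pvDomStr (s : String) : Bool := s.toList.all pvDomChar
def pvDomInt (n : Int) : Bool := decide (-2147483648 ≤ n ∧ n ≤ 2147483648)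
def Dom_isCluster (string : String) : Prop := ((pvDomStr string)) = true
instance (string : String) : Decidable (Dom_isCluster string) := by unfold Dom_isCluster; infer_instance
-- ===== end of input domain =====

-- B finds each vowel's first index with five whole-string str.find scans and takes their minimum (default len), instead of A's single prefix-counting loop with a per-character vowel-list scan (alternative decomposition; same asymptotic cost).


-- ===== PORT A =====
def pvVowels : List Char := ['a', 'e', 'i', 'o', 'u']

-- 'for item in vowels: if character == item: return False; return True'
def isConsonant (character : Char) : Bool :=
  pvIsConsonantLoop character pvVowels
where
  pvIsConsonantLoop (character : Char) : List Char → Bool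
    | [] => true
    | item :: rest => if character = item then false else pvIsConsonantLoop character rest

-- 'n=0; for char in string: if not isConsonant(char): break; n+=1'
def pvClusterLoop (n : Int) : List Char → Int
  | [] => n
  | c :: rest => if !(isConsonant c) then n else pvClusterLoop (n + 1) rest

def isCluster (string : String) : Bool × Int :=
  let n := pvClusterLoop 0 string.toList
  if n > 1 then (true, n) else (false, 0)

-- ===== PORT B =====
-- 'hits = [i for i in (string.find(v) for v in "aeiou") if i != -1]'
-- 'n = min(hits) if hits else len(string)'
def isCluster_alt (string : String) : Bool × Int :=
  let hits := (("aeiou".toList).map (fun v => PySem.Str.find string (String.ofList [v]))).filter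
      (fun i => i != -1)
  let n : Int :=
    match PySem.List.min? hits (fun x => x) with
    | some m => m
    | none => (PySem.Str.len string : Int)
  if n > 1 then (true, n) else (false, 0)

-- ===== PRECONDITION & SPEC =====
def Spec_isCluster (string : String) (out : Bool × Int) : Prop := out = isCluster_alt string
instance (string : String) (out : Bool × Int) : Decidable (Spec_isCluster string out) := by unfold Spec_isCluster; infer_instance

-- ===== CLAIM (what is proved, stated in full; the proofs are below) =====
def Claim_equal_isCluster : Prop := ∀ (string : String), Dom_isCluster string → Spec_isCluster string (isCluster string)

-- ===== LEMMAS AND PROOFS =====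

-- first index of the character v in l (Source B's string.find of a single char), over findIdx?
def pvFindI (v : Char) (l : List Char) : Int :=
  match l.findIdx? (fun c => c = v) with
  | some i => (i : Int)
  | none => -1

theorem prefix_singleton_drop (l : List Char) (v : Char) (i : Nat) :
    [v] <+: l.drop i ↔ l[i]? = some v := by
  rw [← List.head?_drop]
  cases hm : l.drop i with
  | nil => simp
  | cons c t => simp [List.cons_prefix_cons, eq_comm]

theorem infix_singleton (v : Char) (l : List Char) : [v] <:+: l ↔ v ∈ l := by
  rw [← PySem.Chars.isIn_iff_infix, ← PySem.Chars.exists_prefix_drop_iff_isIn]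
  constructor
  · rintro ⟨j, hj⟩
    exact List.mem_of_getElem? ((prefix_singleton_drop l v j).1 hj)
  · intro hv
    obtain ⟨j, hj⟩ := List.mem_iff_getElem?.1 hv
    exact ⟨j, (prefix_singleton_drop l v j).2 hj⟩

theorem find_singleton (l : List Char) (v : Char) :
    PySem.Chars.find l [v] = pvFindI v l := by
  unfold pvFindI
  cases hf : l.findIdx? (fun c => c = v) with
  | none =>
    show PySem.Chars.find l [v] = -1
    rw [List.findIdx?_eq_none_iff] at hf
    have hv : v ∉ l := by
      intro hv
      simpa using hf v hv
    simp [PySem.Chars.find_eq_neg_one_iff, infix_singleton, hv]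
  | some i =>
    show PySem.Chars.find l [v] = (i : Int)
    obtain ⟨hi, hpi, hmin⟩ := List.findIdx?_eq_some_iff_getElem.1 hf
    have hiv : l[i] = v := by simpa using hpi
    have hgi : l[i]? = some v := by rw [List.getElem?_eq_getElem hi, hiv]
    have hnn : 0 ≤ PySem.Chars.find l [v] :=
      (PySem.Chars.find_nonneg_iff l [v]).2 ((infix_singleton v l).2 (List.mem_of_getElem? hgi))
    obtain ⟨hpre, hlt⟩ := PySem.Chars.find_spec hnn
    have hkl : l[(PySem.Chars.find l [v]).toNat]? = some v :=
      (prefix_singleton_drop l v _).1 hpre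
    have hk1 : ¬ (PySem.Chars.find l [v]).toNat < i := by
      intro hki
      have hlen : (PySem.Chars.find l [v]).toNat < l.length := by omega
      have : l[(PySem.Chars.find l [v]).toNat] = v := by
        rw [List.getElem?_eq_getElem hlen] at hkl
        exact Option.some.inj hkl
      exact hmin _ hki (by simp [this])
    have hk2 : ¬ i < (PySem.Chars.find l [v]).toNat := by
      intro hik
      exact hlt i hik ((prefix_singleton_drop l v i).2 hgi)
    omega

theorem pvClusterLoop_shift (l : List Char) (n : Int) :
    pvClusterLoop n l = n + pvClusterLoop 0 l := by
  induction l generalizing n with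
  | nil => simp [pvClusterLoop]
  | cons c t ih =>
    by_cases h : isConsonant c
    · simp only [pvClusterLoop, h, Bool.not_true, Bool.false_eq_true, if_false]
      rw [ih (n + 1), ih (0 + 1)]; ring
    · simp [pvClusterLoop, h]

theorem isConsonant_eq (c : Char) :
    isConsonant c = !(("aeiou".toList).contains c) := by
  simp [isConsonant, isConsonant.pvIsConsonantLoop, pvVowels]

theorem filter_step (xs : List Int) (h : ∀ x ∈ xs, x = -1 ∨ 0 ≤ x) :
    ((xs.map (fun x => if x = -1 then (-1 : Int) else x + 1)).filter (fun i => i != -1))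
      = (xs.filter (fun i => i != -1)).map (fun x => x + 1) := by
  induction xs with
  | nil => simp
  | cons x t ih =>
    have hx := h x (by simp)
    have ht : ∀ y ∈ t, y = -1 ∨ 0 ≤ y := fun y hy => h y (by simp [hy])
    by_cases hx1 : x = -1
    · simp [hx1, ih ht]
    · have hge : 0 ≤ x := by rcases hx with h' | h' <;> [exact absurd h' hx1; exact h']
      have hne : x + 1 ≠ -1 := by omega
      simp [hx1, hne, ih ht]

theorem foldl_min_add_one (t : List Int) (x : Int) :
    (t.map (fun y => y + 1)).foldl min (x + 1) = t.foldl min x + 1 := by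
  induction t generalizing x with
  | nil => simp
  | cons a s ih =>
    simp only [List.map_cons, List.foldl_cons]
    rw [min_add_add_right]
    exact ih (min x a)

theorem min?_map_add_one (xs : List Int) :
    PySem.List.min? (xs.map (fun x => x + 1)) (fun x => x)
      = (PySem.List.min? xs (fun x => x)).map (fun x => x + 1) := by
  cases xs with
  | nil => simp [PySem.List.min?]
  | cons x t =>
    rw [List.map_cons, PySem.List.min?_id_cons, PySem.List.min?_id_cons]
    simp [foldl_min_add_one]

theorem pvFindI_shape (v : Char) (l : List Char) : pvFindI v l = -1 ∨ 0 ≤ pvFindI v l := by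
  unfold pvFindI
  cases hfi : l.findIdx? (fun c => c = v) with
  | none => left; rfl
  | some i => right; exact Int.natCast_nonneg i

theorem alt_n (l : List Char) :
    (match PySem.List.min?
        ((("aeiou".toList).map (fun v => pvFindI v l)).filter (fun i => i != -1)) (fun x => x) with
      | some m => m
      | none => (l.length : Int)) = pvClusterLoop 0 l := by
  induction l with
  | nil =>
    simp [pvFindI, pvClusterLoop, PySem.List.min?]
  | cons c t ih =>
    by_cases hc : c ∈ "aeiou".toList
    · -- c is a vowel: 0 is among the hits and every hit is ≥ 0, so the min is 0
      have hzero : (0 : Int) ∈ (("aeiou".toList).map (fun v => pvFindI v (c :: t))).filter (fun i => i != -1) := by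
        refine List.mem_filter.2 ⟨List.mem_map.2 ⟨c, hc, ?_⟩, by decide⟩
        simp [pvFindI, List.findIdx?_cons]
      have hnonneg : ∀ x ∈ (("aeiou".toList).map (fun v => pvFindI v (c :: t))).filter (fun i => i != -1),
          (0 : Int) ≤ x := by
        intro x hx
        obtain ⟨hmem, hne⟩ := List.mem_filter.1 hx
        obtain ⟨v, _, hv⟩ := List.mem_map.1 hmem
        rcases pvFindI_shape v (c :: t) with h' | h'
        · rw [hv] at h'; simp [h'] at hne
        · omega
      cases hmin : PySem.List.min?
          ((("aeiou".toList).map (fun v => pvFindI v (c :: t))).filter (fun i => i != -1)) (fun x => x) with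
      | none =>
        rw [PySem.List.min?_eq_none_iff] at hmin
        rw [hmin] at hzero; simp at hzero
      | some m =>
        have h1 : (0:Int) ≤ m := hnonneg m (PySem.List.min?_mem hmin)
        have h2 : m ≤ 0 := PySem.List.min?_isMin hmin 0 hzero
        have hc' : c = 'a' ∨ c = 'e' ∨ c = 'i' ∨ c = 'o' ∨ c = 'u' := by simpa using hc
        have hcons : isConsonant c = false := by
          rw [isConsonant_eq]
          simp
          tauto
        simp only [pvClusterLoop, hcons, Bool.not_false, if_pos]
        omega
    · -- c is a consonant: every first-vowel-index shifts by one
      have hshift : ∀ v ∈ "aeiou".toList,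
          pvFindI v (c :: t) = (fun x => if x = -1 then (-1:Int) else x + 1) (pvFindI v t) := by
        intro v hv
        have hne : ¬ (c = v) := fun h => hc (h ▸ hv)
        unfold pvFindI
        rw [List.findIdx?_cons]
        simp only [hne, decide_false]
        cases hfi : t.findIdx? (fun ch => ch = v) with
        | none => simp
        | some i =>
          have hi1 : ((i : Int)) ≠ -1 := by omega
          simp [hi1]
      have hmapeq : ("aeiou".toList).map (fun v => pvFindI v (c :: t))
          = (("aeiou".toList).map (fun v => pvFindI v t)).map (fun x => if x = -1 then (-1:Int) else x + 1) := by
        rw [List.map_map]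
        exact List.map_congr_left hshift
      have hbase : ∀ x ∈ ("aeiou".toList).map (fun v => pvFindI v t), x = -1 ∨ 0 ≤ x := by
        intro x hx
        obtain ⟨v, _, hv⟩ := List.mem_map.1 hx
        rw [← hv]
        exact pvFindI_shape v t
      have hc' : ¬ (c = 'a' ∨ c = 'e' ∨ c = 'i' ∨ c = 'o' ∨ c = 'u') := by simpa using hc
      have hcons : isConsonant c = true := by
        rw [isConsonant_eq]
        simp
        tauto
      rw [hmapeq, filter_step _ hbase, min?_map_add_one]
      rw [show pvClusterLoop 0 (c :: t) = 1 + pvClusterLoop 0 t by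
        simp only [pvClusterLoop, hcons, Bool.not_true, Bool.false_eq_true, if_false]
        exact pvClusterLoop_shift t (0 + 1)]
      rw [← ih]
      cases hmin : PySem.List.min?
          ((("aeiou".toList).map (fun v => pvFindI v t)).filter (fun i => i != -1)) (fun x => x) with
      | none => simp; ring
      | some m => simp; ring

-- ===== VERDICT (by name: the statement is the Claim_ definition above) =====
theorem isCluster_spec : Claim_equal_isCluster := by
  intro s _
  unfold Spec_isCluster isCluster isCluster_alt
  have h : (("aeiou".toList).map (fun v => PySem.Str.find s (String.ofList [v])))
      = ("aeiou".toList).map (fun v => pvFindI v s.toList) := by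
    refine List.map_congr_left (fun v _ => ?_)
    rw [PySem.Str.find_eq]
    simpa using find_singleton s.toList v
  simp only [h, PySem.Str.len_eq]
  rw [← alt_n s.toList]
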